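-- pv_equiv track=rewrite | github.com/Chocolate-Moose/gray-codes | main.py | generate_reflected_code
-- ===== SOURCE A (Python) =====
-- def generate_reflected_code(radices):
--     old_result = []
--     new_result = []
--
--     # compute gray code for rightmost radix
--     for i in range(radices[len(radices)-1]):
--         old_result.append([i])
--
--     # iteratively add other radices from right to left (excluding right and left most)
--     for radix in radices[len(radices)-2:0:-1]:
--         ascending = True
--
--         # prepend new radix to all numbers
--         for i in range(radix):
--             if ascending:
--                 for old in old_result:
--                     new_result.append([i] + old)
--             else:
--                 for old in old_result[::-1]:
--                     new_result.append([i] + old)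
--             ascending = not ascending
--
--         old_result = new_result
--         new_result = []
--
--     return old_result
-- ===== SOURCE B (Python) =====
-- def generate_reflected_code(radices):
--     # used radices, most-significant first (A ignores radices[0] when len >= 2)
--     R = radices[1:len(radices)-1] + [radices[-1]]
--     total = 1
--     for r in R:
--         if r <= 0:
--             total = 0
--             break
--         total *= r
--     result = []
--     for n in range(total):
--         row = []
--         rem = n
--         weight = total
--         for r in R:
--             weight //= r
--             d = rem // weight
--             rem %= weight
--             if d % 2 == 1:
--                 # odd digit: the block below is traversed in reflected order
--                 rem = weight - 1 - rem
--             row.append(d)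
--         result.append(row)
--     return result
-- ===== Notes on version B (the rewrite author's own statement) =====
-- stated objective: alternative
-- what changed: B replaces A's iterative list-reflection construction (repeatedly prepending a digit to the previous table, alternating its direction) by direct unranking: it computes the n-th Gray row for each n in range(product) by mixed-radix digit extraction with index reflection, never storing or reversing intermediate tables.
import Mathlib
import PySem

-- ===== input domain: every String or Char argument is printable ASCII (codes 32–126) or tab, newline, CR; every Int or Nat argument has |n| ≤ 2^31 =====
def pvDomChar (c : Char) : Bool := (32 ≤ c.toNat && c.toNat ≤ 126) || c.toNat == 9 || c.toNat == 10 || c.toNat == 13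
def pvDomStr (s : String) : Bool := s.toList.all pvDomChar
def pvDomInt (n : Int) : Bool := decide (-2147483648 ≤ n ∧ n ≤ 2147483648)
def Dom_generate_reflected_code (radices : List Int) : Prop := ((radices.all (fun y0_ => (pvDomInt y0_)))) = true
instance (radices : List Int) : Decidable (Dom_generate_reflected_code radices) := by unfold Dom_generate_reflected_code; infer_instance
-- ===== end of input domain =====

-- B replaces A's iterative reflected-table construction by direct per-index unranking
-- (mixed-radix digit extraction with index reflection); same cost, no intermediate tables.


-- ===== PORT A =====
-- helper: the body of A's middle loop ('for radix in radices[len-2:0:-1]'): one pass that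
-- prepends digit i to old_result, alternating direction ('ascending'), accumulating new_result
def pvStepA (old : List (List Int)) (radix : Int) : List (List Int) :=
  ((PySem.List.pyRange 0 radix 1).foldl
    (fun (st : List (List Int) × Bool) i =>
      (if st.2 then st.1 ++ old.map (fun o => i :: o)
       else st.1 ++ ((PySem.List.slice? old none none (-1)).getD []).map (fun o => i :: o),
       !st.2))
    ([], true)).1

def generate_reflected_code (radices : List Int) : List (List Int) :=
  -- the last-element access raises IndexError on the empty list; Pre_ excludes it, the default is unreachable
  let old0 : List (List Int) :=
    (PySem.List.pyRange 0 (PySem.List.pyGetD radices ((radices.length : Int) - 1) 0) 1).foldl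
      (fun acc i => acc ++ [[i]]) []
  let mids := (PySem.List.slice? radices (some ((radices.length : Int) - 2)) (some 0) (-1)).getD []
  mids.foldl pvStepA old0

-- ===== PORT B =====
-- helper: B's 'total' loop (product of R, 0 with break as soon as a radix is ≤ 0)
def pvTotalB : List Int → Int → Int
  | [], acc => acc
  | r :: rs, acc => if r ≤ 0 then 0 else pvTotalB rs (acc * r)

def generate_reflected_code_alt (radices : List Int) : List (List Int) :=
  -- the last-element access raises IndexError on the empty list; Pre_ excludes it, the default is unreachable
  let R := PySem.List.slice radices (some 1) (some ((radices.length : Int) - 1))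
           ++ [PySem.List.pyGetD radices (-1) 0]
  let total := pvTotalB R 1
  (PySem.List.pyRange 0 total 1).foldl
    (fun res n =>
      res ++ [(R.foldl
        (fun (st : List Int × Int × Int) r =>
          let weight := PySem.Int.floordiv st.2.2 r
          let d := PySem.Int.floordiv st.2.1 weight
          let rem := PySem.Int.mod st.2.1 weight
          let rem' := if PySem.Int.mod d 2 = 1 then weight - 1 - rem else rem
          (st.1 ++ [d], rem', weight))
        ([], n, total)).1])
    []

-- ===== PRECONDITION & SPEC =====
-- Pre_ excludes only the empty list, on which both A and B raise IndexError at their last-element access.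
def Pre_generate_reflected_code (radices : List Int) : Prop := radices ≠ []
instance (radices : List Int) : Decidable (Pre_generate_reflected_code radices) := by
  unfold Pre_generate_reflected_code; infer_instance

def pvWitness_generate_reflected_code : List Int := [3, 2, 3]

def Spec_generate_reflected_code (radices : List Int) (out : List (List Int)) : Prop := out = generate_reflected_code_alt radices
instance (radices : List Int) (out : List (List Int)) : Decidable (Spec_generate_reflected_code radices out) := by unfold Spec_generate_reflected_code; infer_instance

-- ===== CLAIM (what is proved, stated in full; the proofs are below) =====
def Claim_equal_generate_reflected_code : Prop := ∀ (radices : List Int), Dom_generate_reflected_code radices → Pre_generate_reflected_code radices → Spec_generate_reflected_code radices (generate_reflected_code radices)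

-- ===== LEMMAS AND PROOFS =====

-- the clean recursive reflected Gray table (A's algorithm, structurally)
def pvG : List Int → List (List Int)
  | [] => [[]]
  | r :: rs => pvStepA (pvG rs) r

-- the clean per-index decode (B's algorithm, structurally): digit = n / prod rs,
-- recurse on the remainder, reflected when the digit is odd
def pvDec : List Int → Int → List Int
  | [], _ => []
  | _ :: rs, n =>
      let P := (rs.prod : Int)
      let d := n / P
      let m := n % P
      d :: pvDec rs (if d % 2 = 1 then P - 1 - m else m)

-- one block step as a flatMap over a Nat range
def pvBlocks (old : List (List Int)) (n : Nat) : List (List Int) :=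
  (List.range n).flatMap (fun (i : Nat) =>
    (if i % 2 = 0 then old else old.reverse).map (fun o => (Int.ofNat i) :: o))

theorem pvStepA_aux (old : List (List Int)) (n : Nat) :
    ((PySem.List.pyRange 0 (n : Int) 1).foldl
      (fun (st : List (List Int) × Bool) i =>
        (if st.2 then st.1 ++ old.map (fun o => i :: o)
         else st.1 ++ ((PySem.List.slice? old none none (-1)).getD []).map (fun o => i :: o),
         !st.2))
      ([], true)) = (pvBlocks old n, decide (n % 2 = 0)) := by
  induction n with
  | zero => simp [pvBlocks, PySem.List.pyRange_one_eq_nil]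
  | succ m ih =>
    have hsplit : PySem.List.pyRange 0 ((m + 1 : Nat) : Int) 1
        = PySem.List.pyRange 0 (m : Int) 1 ++ [(m : Int)] := by
      push_cast
      exact PySem.List.pyRange_one_succ_right (by positivity)
    rw [hsplit, List.foldl_append, ih]
    have hblocks : pvBlocks old (m + 1)
        = pvBlocks old m ++ (if m % 2 = 0 then old else old.reverse).map (fun o => ((m : Int)) :: o) := by
      simp [pvBlocks, List.range_succ]
    by_cases hm : m % 2 = 0
    · rw [hblocks, if_pos hm]
      simp [hm, Nat.succ_mod_two_eq_zero_iff]
    · rw [hblocks, if_neg hm]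
      have hm1 : m % 2 = 1 := Nat.mod_two_ne_zero.mp hm
      simp [hm1, PySem.List.slice?_none_none_neg_one, Nat.succ_mod_two_eq_zero_iff]

theorem pvStepA_eq_blocks (old : List (List Int)) (radix : Int) :
    pvStepA old radix = pvBlocks old radix.toNat := by
  unfold pvStepA
  by_cases h : radix ≤ 0
  · have h0 : radix.toNat = 0 := Int.toNat_of_nonpos h
    rw [PySem.List.pyRange_one_eq_nil h, h0]
    simp [pvBlocks]
  · have : radix = ((radix.toNat : Nat) : Int) := (Int.toNat_of_nonneg (by omega)).symm
    rw [this, pvStepA_aux]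
    simp
    congr 1
    omega

theorem pvStepA_nil (radix : Int) : pvStepA [] radix = [] := by
  simp [pvStepA_eq_blocks, pvBlocks]

theorem pvG_of_nonpos {R : List Int} (h : ∃ r ∈ R, r ≤ 0) : pvG R = [] := by
  induction R with
  | nil => simp at h
  | cons r rs ih =>
    rcases h with ⟨x, hx, hx0⟩
    rcases List.mem_cons.mp hx with rfl | hmem
    · show pvStepA (pvG rs) x = []
      rw [pvStepA_eq_blocks, Int.toNat_of_nonpos hx0]
      simp [pvBlocks]
    · show pvStepA (pvG rs) r = []
      rw [ih ⟨x, hmem, hx0⟩, pvStepA_nil]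

theorem pvTotalB_of_nonpos {R : List Int} (h : ∃ r ∈ R, r ≤ 0) (acc : Int) :
    pvTotalB R acc = 0 := by
  induction R generalizing acc with
  | nil => simp at h
  | cons r rs ih =>
    rcases h with ⟨x, hx, hx0⟩
    rcases List.mem_cons.mp hx with rfl | hmem
    · simp [pvTotalB, hx0]
    · show (if r ≤ 0 then 0 else pvTotalB rs (acc * r)) = 0
      split_ifs
      · rfl
      · exact ih ⟨x, hmem, hx0⟩ _

theorem pvTotalB_of_pos {R : List Int} (h : ∀ r ∈ R, 0 < r) (acc : Int) :
    pvTotalB R acc = acc * R.prod := by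
  induction R generalizing acc with
  | nil => simp [pvTotalB]
  | cons r rs ih =>
    have hr : 0 < r := h r (by simp)
    show (if r ≤ 0 then 0 else pvTotalB rs (acc * r)) = acc * (r :: rs).prod
    rw [if_neg (by omega), ih (fun x hx => h x (by simp [hx])) (acc * r)]
    simp [List.prod_cons]
    ring

-- core: A's reflected table is the list of decodes of 0 .. prod-1
theorem reverse_range_map (n : Nat) :
    (List.range n).reverse = (List.range n).map (fun k => n - 1 - k) := by
  apply List.ext_getElem
  · simp
  · intro i h1 h2
    simp at h1 ⊢

theorem range_mul_flatMap (a b : Nat) :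
    List.range (a * b) = (List.range a).flatMap (fun i => (List.range b).map (fun m => i * b + m)) := by
  induction a with
  | zero => simp
  | succ k ih =>
    rw [Nat.succ_mul, List.range_add, ih, List.range_succ, List.flatMap_append]
    simp

theorem pvG_eq_map_dec {R : List Int} (h : ∀ r ∈ R, 0 < r) :
    pvG R = (List.range R.prod.toNat).map (fun (n : Nat) => pvDec R (Int.ofNat n)) := by
  induction R with
  | nil => simp [pvG, pvDec]
  | cons r rs ih =>
    have hr : 0 < r := h r (by simp)
    have hP : 0 < (rs.prod : Int) := List.prod_pos (fun x hx => h x (by simp [hx]))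
    have ihs := ih (fun x hx => h x (by simp [hx]))
    set b := rs.prod.toNat with hb
    have hPb : (rs.prod : Int) = (b : Int) := by rw [hb, Int.toNat_of_nonneg (by omega)]
    set a := r.toNat with ha
    have hra : r = (a : Int) := by rw [ha, Int.toNat_of_nonneg (by omega)]
    have htot : ((r :: rs).prod).toNat = a * b := by
      rw [List.prod_cons, hra, hPb, ← Nat.cast_mul, Int.toNat_natCast]
    show pvStepA (pvG rs) r = _
    rw [pvStepA_eq_blocks, ← ha, htot, range_mul_flatMap, List.map_flatMap]
    apply List.flatMap_congr
    intro i hi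
    rw [List.mem_range] at hi
    rw [List.map_map]
    have hone : ∀ m ∈ List.range b,
        pvDec (r :: rs) (Int.ofNat (i * b + m))
          = Int.ofNat i :: pvDec rs (if (Int.ofNat i) % 2 = 1 then (rs.prod : Int) - 1 - Int.ofNat m else Int.ofNat m) := by
      intro m hm
      rw [List.mem_range] at hm
      have hb0 : 0 < b := by omega
      have hdivN : (i * b + m) / b = i := by
        rw [Nat.mul_comm i b, Nat.mul_add_div hb0, Nat.div_eq_of_lt hm, Nat.add_zero]
      have hmodN : (i * b + m) % b = m := by
        rw [Nat.mul_comm i b, Nat.mul_add_mod, Nat.mod_eq_of_lt hm]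
      have hdiv : (Int.ofNat (i * b + m)) / (rs.prod : Int) = Int.ofNat i := by
        rw [hPb]
        rw [show (Int.ofNat (i * b + m)) = ((i * b + m : Nat) : Int) from rfl, ← Int.natCast_ediv, hdivN]
        rfl
      have hmod : (Int.ofNat (i * b + m)) % (rs.prod : Int) = Int.ofNat m := by
        rw [hPb]
        rw [show (Int.ofNat (i * b + m)) = ((i * b + m : Nat) : Int) from rfl, ← Int.natCast_emod, hmodN]
        rfl
      show ((Int.ofNat (i * b + m)) / (rs.prod : Int))
          :: pvDec rs (if ((Int.ofNat (i * b + m)) / (rs.prod : Int)) % 2 = 1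
              then (rs.prod : Int) - 1 - (Int.ofNat (i * b + m)) % (rs.prod : Int)
              else (Int.ofNat (i * b + m)) % (rs.prod : Int)) = _
      rw [hdiv, hmod]
    simp only [Function.comp_def]
    rw [List.map_congr_left hone]
    by_cases hpar : i % 2 = 0
    · have hpar' : ¬ ((Int.ofNat i) % 2 = 1) := by
        rw [show (Int.ofNat i) = ((i : Nat) : Int) from rfl]
        omega
      rw [if_pos hpar]
      simp only [if_neg hpar']
      rw [ihs, List.map_map]
      rfl
    · have hpar' : (Int.ofNat i) % 2 = 1 := by
        rw [show (Int.ofNat i) = ((i : Nat) : Int) from rfl]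
        omega
      rw [if_neg hpar]
      simp only [if_pos hpar']
      rw [ihs, ← List.map_reverse, reverse_range_map, List.map_map, List.map_map]
      apply List.map_congr_left
      intro m hm
      rw [List.mem_range] at hm
      have : (rs.prod : Int) - 1 - Int.ofNat m = Int.ofNat (b - 1 - m) := by
        rw [hPb]
        simp only [Int.ofNat_eq_natCast]
        omega
      simp only [Function.comp, this]

-- A's fold over the middle radices builds pvG
theorem foldl_stepA_eq_pvG (ms S : List Int) :
    ms.foldl pvStepA (pvG S) = pvG (ms.reverse ++ S) := by
  induction ms generalizing S with
  | nil => simp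
  | cons m ms ih =>
    have hstep : pvStepA (pvG S) m = pvG (m :: S) := rfl
    simp only [List.foldl_cons, hstep, ih (m :: S), List.reverse_cons, List.append_assoc,
      List.cons_append, List.nil_append]

-- A's first loop is pvG [rlast]
theorem old0_eq_pvG (r : Int) :
    (PySem.List.pyRange 0 r 1).foldl (fun acc i => acc ++ [[i]]) [] = pvG [r] := by
  have hG : pvG [r] = pvBlocks [[]] r.toNat := pvStepA_eq_blocks [[]] r
  have hB : pvBlocks [[]] r.toNat = (List.range r.toNat).map (fun (i : Nat) => [Int.ofNat i]) := by
    unfold pvBlocks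
    have hone : ∀ i : Nat,
        ((if i % 2 = 0 then [([] : List Int)] else [([] : List Int)].reverse).map
          (fun o => (Int.ofNat i) :: o)) = [[Int.ofNat i]] := by
      intro i; split_ifs <;> rfl
    rw [List.flatMap_congr (fun i _ => hone i)]
    exact List.map_eq_flatMap.symm
  rw [hG, hB]
  by_cases h : r ≤ 0
  · rw [PySem.List.pyRange_one_eq_nil h, Int.toNat_of_nonpos h]
    simp
  · have hr : r = ((r.toNat : Nat) : Int) := (Int.toNat_of_nonneg (by omega)).symm
    rw [hr, PySem.List.pyRange_one 0 _]
    simp only [Int.sub_zero, Int.toNat_natCast, Int.zero_add]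
    induction (r.toNat) with
    | zero => simp
    | succ k ihk =>
      rw [List.range_succ, List.map_append, List.foldl_append, ihk]
      simp

-- the middle slice radices[len-2:0:-1]
theorem mids_eq (xs : List Int) :
    (PySem.List.slice? xs (some ((xs.length : Int) - 2)) (some 0) (-1)).getD []
      = xs.tail.dropLast.reverse := by
  match xs with
  | [] => rfl
  | [x] => rfl
  | a :: b :: t =>
    simp only [PySem.List.slice?, PySem.List.sliceIndices, List.length_cons]
    push_cast
    have h1 : ¬((t.length : Int) + 1 + 1 - 2 < 0) := by omega
    simp [h1]
    have hc : (if 2 ≤ (t.length:Int) + 1 ∨ (t.length:Int) + 1 < (t.length:Int) + 1 + 1 - 2 then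
          ((t.length:Int) + 1 + 1 - 2 - min 0 ((t.length:Int) + 1)).toNat
        else 0) = t.length := by
      split_ifs <;> omega
    rw [hc]
    have hidx : ∀ x : Nat, ((t.length:Int) + 1 + 1 - 2 + -(x:Int)).toNat = t.length - x := by
      intro x; omega
    simp only [hidx]
    have hsome : ∀ x ∈ List.range t.length,
        (a :: b :: t)[t.length - x]? = some ((b :: t).getD (t.length - 1 - x) 0) := by
      intro x hx
      rw [List.mem_range] at hx
      have hs : t.length - x = (t.length - 1 - x) + 1 := by omega
      rw [hs, List.getElem?_cons_succ, List.getElem?_eq_getElem (by simp; omega),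
        List.getD_eq_getElem _ _ (by simp; omega)]
    rw [List.filterMap_congr hsome]
    rw [show (fun x => some ((b :: t).getD (t.length - 1 - x) 0)) = some ∘ (fun x => (b :: t).getD (t.length - 1 - x) 0) from rfl, List.filterMap_eq_map]
    apply List.ext_getElem
    · simp
    · intro i hi1 hi2
      simp only [List.getElem_map, List.getElem_range, List.getElem_reverse, List.getElem_dropLast]
      rw [List.getD_eq_getElem _ _ (by simp at hi1 ⊢; omega)]
      congr 1
      simp at hi1 hi2
      have hd : (b :: t).dropLast.length = t.length := by simp
      omega

-- B's R equals A's used radices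
theorem pvR_eq (xs : List Int) (h : xs ≠ []) :
    PySem.List.slice xs (some 1) (some ((xs.length : Int) - 1))
      ++ [PySem.List.pyGetD xs (-1) 0]
      = xs.tail.dropLast ++ [xs.getLast h] := by
  have hlen : 1 ≤ xs.length := List.length_pos_iff.mpr h
  rw [PySem.List.slice_toNat xs (a := 1) (b := (xs.length:Int)-1) (by omega) (by omega)]
  simp only [PySem.List.pyGetD_neg_one xs 0 h]
  congr 1
  have ht : Int.toNat 1 = 1 := rfl
  rw [ht, List.drop_one, List.dropLast_eq_take]
  congr 1
  simp

-- B's inner fold computes pvDec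
theorem foldB_eq_dec (R : List Int) (h : ∀ r ∈ R, 0 < r) (row : List Int) (n : Int) :
    (R.foldl
        (fun (st : List Int × Int × Int) r =>
          let weight := PySem.Int.floordiv st.2.2 r
          let d := PySem.Int.floordiv st.2.1 weight
          let rem := PySem.Int.mod st.2.1 weight
          let rem' := if PySem.Int.mod d 2 = 1 then weight - 1 - rem else rem
          (st.1 ++ [d], rem', weight))
        (row, n, (R.prod : Int))).1 = row ++ pvDec R n := by
  induction R generalizing row n with
  | nil => simp [pvDec]
  | cons r rs ih =>
    have hr : 0 < r := h r (by simp)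
    have hP : 0 < (rs.prod : Int) := List.prod_pos (fun x hx => h x (by simp [hx]))
    have hw : PySem.Int.floordiv ((r :: rs).prod) r = rs.prod := by
      rw [List.prod_cons, PySem.Int.floordiv_eq_ediv_of_pos hr, Int.mul_ediv_cancel_left _ (by omega)]
    simp only [List.foldl_cons, hw]
    rw [ih (fun x hx => h x (by simp [hx]))]
    have hd : PySem.Int.floordiv n rs.prod = n / rs.prod := PySem.Int.floordiv_eq_ediv_of_pos hP
    have hm : PySem.Int.mod n rs.prod = n % rs.prod := PySem.Int.mod_eq_emod_of_pos hP
    have h2 : PySem.Int.mod (n / rs.prod) 2 = (n / rs.prod) % 2 :=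
      PySem.Int.mod_eq_emod_of_pos (by omega)
    simp only [hd, hm, h2, pvDec, List.append_assoc, List.singleton_append]

-- ===== VERDICT (by name: the statement is the Claim_ definition above) =====
theorem generate_reflected_code_spec : Claim_equal_generate_reflected_code := by
  intro radices _hdom hne
  unfold Spec_generate_reflected_code generate_reflected_code generate_reflected_code_alt
  dsimp only
  have hne' : radices ≠ [] := hne
  have hlen : 1 ≤ radices.length := List.length_pos_iff.mpr hne'
  -- A side: the first loop is pvG [last], the middle loop folds pvStepA over the reversed middle
  have hlast : PySem.List.pyGetD radices ((radices.length : Int) - 1) 0 = radices.getLast hne' := by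
    rw [PySem.List.pyGetD_eq_getElem radices 0 (by omega) (by omega), List.getLast_eq_getElem]
    congr 1
    omega
  rw [hlast, old0_eq_pvG, mids_eq, foldl_stepA_eq_pvG, List.reverse_reverse, pvR_eq radices hne']
  set Ru : List Int := radices.tail.dropLast ++ [radices.getLast hne'] with hRu
  by_cases hpos : ∀ r ∈ Ru, 0 < r
  · -- all used radices positive: both sides are the decode table
    rw [pvTotalB_of_pos hpos 1, Int.one_mul, pvG_eq_map_dec hpos, PySem.List.pyRange_one,
      PySem.List.foldl_append_singleton_eq_map
        (f := fun n => (Ru.foldl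
          (fun (st : List Int × Int × Int) r =>
            let weight := PySem.Int.floordiv st.2.2 r
            let d := PySem.Int.floordiv st.2.1 weight
            let rem := PySem.Int.mod st.2.1 weight
            let rem' := if PySem.Int.mod d 2 = 1 then weight - 1 - rem else rem
            (st.1 ++ [d], rem', weight))
          ([], n, Ru.prod)).1)]
    rw [List.nil_append, List.map_map]
    simp only [Int.sub_zero]
    apply List.map_congr_left
    intro n _
    rw [Function.comp_apply, foldB_eq_dec Ru hpos [] _, List.nil_append]
    congr 1
    simp [Int.ofNat_eq_natCast]
  · -- some used radix is ≤ 0: A's table is empty and B's total is 0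
    rw [not_forall] at hpos
    simp only [not_forall, exists_prop, not_lt] at hpos
    rcases hpos with ⟨x, hx, hx0⟩
    rw [pvG_of_nonpos ⟨x, hx, by omega⟩, pvTotalB_of_nonpos ⟨x, hx, by omega⟩ 1,
      PySem.List.pyRange_one_eq_nil (by omega), List.foldl_nil]
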